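-- pv_equiv track=rewrite | github.com/lywyamy/ada-classroom | core-problem-set-recursion/part-2.py | digit_match
-- ===== SOURCE A (Python) =====
-- def digit_match(num_a, num_b):
--     if num_a < 0 or num_b < 0:
--          raise ValueError("The integers must be non-negative")
--
--     if num_a == 0 and num_b == 0:
--         return 1
--     elif num_a < 10 or num_b < 10:
--         if num_a % 10 == num_b % 10:
--             return 1
--         else:
--             return 0
--     elif num_a % 10 == num_b % 10:
--         return 1 + digit_match(num_a // 10, num_b // 10)
--     else:
--         return digit_match(num_a // 10, num_b // 10)
-- ===== SOURCE B (Python) =====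
-- def digit_match(num_a, num_b):
--     if num_a < 0 or num_b < 0:
--         raise ValueError("The integers must be non-negative")
--     count = 0
--     while num_a >= 10 and num_b >= 10:
--         if num_a % 10 == num_b % 10:
--             count += 1
--         num_a //= 10
--         num_b //= 10
--     if num_a % 10 == num_b % 10:
--         count += 1
--     return count
-- ===== Notes on version B (the rewrite author's own statement) =====
-- stated objective: simpler
-- what changed: Replaced the four-branch recursion (with its redundant both-zero special case) by an iterative while-loop with a count accumulator and a single post-loop comparison.
import Mathlib
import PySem

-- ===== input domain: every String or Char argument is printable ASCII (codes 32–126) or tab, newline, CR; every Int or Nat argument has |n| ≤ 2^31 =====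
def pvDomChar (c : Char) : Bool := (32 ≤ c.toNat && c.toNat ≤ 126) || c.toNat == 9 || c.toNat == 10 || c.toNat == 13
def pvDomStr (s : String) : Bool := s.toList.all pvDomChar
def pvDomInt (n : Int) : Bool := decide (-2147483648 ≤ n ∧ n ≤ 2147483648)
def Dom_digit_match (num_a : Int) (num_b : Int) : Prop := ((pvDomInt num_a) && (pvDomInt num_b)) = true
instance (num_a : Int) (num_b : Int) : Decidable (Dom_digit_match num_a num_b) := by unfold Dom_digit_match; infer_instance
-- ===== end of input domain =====

-- B is the same count computed iteratively: while-loop with an accumulator instead of A's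
-- four-branch recursion (objective: simpler). On negatives both Pythons raise ValueError
-- (excluded by Pre_); the ports return 0 there, which the claim never reaches.

-- termination helper, cited by both ports' decreasing_by
theorem pvDiv10_toNat_lt (a : Int) (h : 10 ≤ a) :
    (PySem.Int.floordiv a 10).toNat < a.toNat := by
  rw [PySem.Int.floordiv_eq_ediv_of_pos (by omega)]
  omega

-- ===== PORT A =====
def digit_match (num_a : Int) (num_b : Int) : Int :=
  if num_a < 0 ∨ num_b < 0 then 0  -- Python raises ValueError here; outside Pre_
  else if num_a = 0 ∧ num_b = 0 then 1
  else if num_a < 10 ∨ num_b < 10 then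
    if PySem.Int.mod num_a 10 = PySem.Int.mod num_b 10 then 1 else 0
  else if PySem.Int.mod num_a 10 = PySem.Int.mod num_b 10 then
    1 + digit_match (PySem.Int.floordiv num_a 10) (PySem.Int.floordiv num_b 10)
  else
    digit_match (PySem.Int.floordiv num_a 10) (PySem.Int.floordiv num_b 10)
termination_by num_a.toNat
decreasing_by all_goals exact pvDiv10_toNat_lt num_a (by omega)

-- ===== PORT B =====
-- the while-loop of Source B: state (num_a, num_b, count)
def dmLoop (num_a : Int) (num_b : Int) (count : Int) : Int :=
  if 10 ≤ num_a ∧ 10 ≤ num_b then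
    dmLoop (PySem.Int.floordiv num_a 10) (PySem.Int.floordiv num_b 10)
      (if PySem.Int.mod num_a 10 = PySem.Int.mod num_b 10 then count + 1 else count)
  else
    if PySem.Int.mod num_a 10 = PySem.Int.mod num_b 10 then count + 1 else count
termination_by num_a.toNat
decreasing_by exact pvDiv10_toNat_lt num_a (by omega)

def digit_match_alt (num_a : Int) (num_b : Int) : Int :=
  if num_a < 0 ∨ num_b < 0 then 0  -- Python raises ValueError here; outside Pre_
  else dmLoop num_a num_b 0

-- ===== PRECONDITION & SPEC =====
-- Pre_ excludes exactly the inputs on which A raises ValueError (negative arguments)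
def Pre_digit_match (num_a : Int) (num_b : Int) : Prop := 0 ≤ num_a ∧ 0 ≤ num_b
instance (num_a : Int) (num_b : Int) : Decidable (Pre_digit_match num_a num_b) := by unfold Pre_digit_match; infer_instance
def pvWitness_digit_match : Int × Int := (123, 723)

def Spec_digit_match (num_a : Int) (num_b : Int) (out : Int) : Prop := out = digit_match_alt num_a num_b
instance (num_a : Int) (num_b : Int) (out : Int) : Decidable (Spec_digit_match num_a num_b out) := by unfold Spec_digit_match; infer_instance

-- ===== CLAIM (what is proved, stated in full; the proofs are below) =====
def Claim_equal_digit_match : Prop := ∀ (num_a : Int) (num_b : Int), Dom_digit_match num_a num_b → Pre_digit_match num_a num_b → Spec_digit_match num_a num_b (digit_match num_a num_b)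

-- ===== LEMMAS AND PROOFS =====

-- loop invariant: for non-negative inputs the loop computes count + A's recursion
theorem dmLoop_eq (num_a num_b count : Int) (ha : 0 ≤ num_a) (hb : 0 ≤ num_b) :
    dmLoop num_a num_b count = count + digit_match num_a num_b := by
  suffices H : ∀ n (num_a num_b count : Int), num_a.toNat = n → 0 ≤ num_a → 0 ≤ num_b →
      dmLoop num_a num_b count = count + digit_match num_a num_b from
    H num_a.toNat num_a num_b count rfl ha hb
  intro n
  induction n using Nat.strong_induction_on with
  | _ n ih =>
    intro num_a num_b count hn ha hb
    rw [dmLoop, digit_match]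
    by_cases hbig : 10 ≤ num_a ∧ 10 ≤ num_b
    · have ha' : 0 ≤ PySem.Int.floordiv num_a 10 := by
        rw [PySem.Int.floordiv_eq_ediv_of_pos (by omega)]; omega
      have hb' : 0 ≤ PySem.Int.floordiv num_b 10 := by
        rw [PySem.Int.floordiv_eq_ediv_of_pos (by omega)]; omega
      have hlt := pvDiv10_toNat_lt num_a hbig.1
      simp only [if_pos hbig, if_neg (by omega : ¬ (num_a < 0 ∨ num_b < 0)),
        if_neg (by omega : ¬ (num_a = 0 ∧ num_b = 0)),
        if_neg (by omega : ¬ (num_a < 10 ∨ num_b < 10))]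
      rw [ih _ (hn ▸ hlt) _ _ _ rfl ha' hb']
      split_ifs <;> ring
    · simp only [if_neg hbig, if_neg (by omega : ¬ (num_a < 0 ∨ num_b < 0))]
      by_cases hz : num_a = 0 ∧ num_b = 0
      · simp [hz, PySem.Int.mod]
      · simp only [if_neg hz, if_pos (by omega : num_a < 10 ∨ num_b < 10)]
        split_ifs <;> ring

-- ===== VERDICT (by name: the statement is the Claim_ definition above) =====
theorem digit_match_spec : Claim_equal_digit_match := by
  intro num_a num_b _ hpre
  obtain ⟨ha, hb⟩ := hpre
  unfold Spec_digit_match digit_match_alt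
  rw [if_neg (by omega : ¬ (num_a < 0 ∨ num_b < 0)), dmLoop_eq _ _ _ ha hb]
  ring
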